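-- pv_equiv track=rewrite | github.com/fareyes4/Advanced-Compilers | working-with-cfgs/src/cfg.py | get_path_lengths
-- ===== SOURCE A (Python) =====
-- from collections import deque
--
-- def get_path_lengths(cfg, entry):
--     dist = {entry: 0}
--     q = deque([entry])
--     while q:
--         u = q.popleft()
--         for v in cfg.get(u, []):
--             if v not in dist:
--                 dist[v] = dist[u] + 1
--                 q.append(v)
--     return dist
-- ===== SOURCE B (Python) =====
-- def get_path_lengths(cfg, entry):
--     # Fixpoint (chaotic) iteration, dataflow-analysis style: no queue, no
--     # frontier.  Each round rescans every node recorded so far and relaxes its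
--     # successors; stop when the table stops growing.
--     dist = {entry: 0}
--     while True:
--         before = len(dist)
--         for u, du in list(dist.items()):
--             for v in cfg.get(u, []):
--                 if v not in dist:
--                     dist[v] = du + 1
--         if len(dist) == before:
--             return dist
-- ===== Notes on version B (the rewrite author's own statement) =====
-- stated objective: alternative
-- what changed: Replaces queue-based BFS with fixpoint (chaotic) iteration in dataflow-analysis style: each round rescans the whole distance table and relaxes every recorded node's successors, stopping when the table stops growing; no queue or frontier is maintained.
import Mathlib
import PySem

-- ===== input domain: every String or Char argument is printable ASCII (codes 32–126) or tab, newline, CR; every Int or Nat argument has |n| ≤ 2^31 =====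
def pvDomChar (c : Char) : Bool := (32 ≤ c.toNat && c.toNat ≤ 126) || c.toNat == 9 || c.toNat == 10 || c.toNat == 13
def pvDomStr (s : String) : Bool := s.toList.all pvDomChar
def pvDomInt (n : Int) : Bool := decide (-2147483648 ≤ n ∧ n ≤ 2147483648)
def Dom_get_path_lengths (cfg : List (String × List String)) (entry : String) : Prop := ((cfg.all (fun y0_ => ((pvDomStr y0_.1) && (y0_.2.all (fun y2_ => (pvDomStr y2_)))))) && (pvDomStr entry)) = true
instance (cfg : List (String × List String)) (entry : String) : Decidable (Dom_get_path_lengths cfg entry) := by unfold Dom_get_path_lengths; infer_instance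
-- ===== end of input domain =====

-- B replaces A's queue-based BFS by fixpoint (chaotic) iteration: each round rescans
-- the whole distance table and relaxes every recorded node's successors, stopping when
-- the table stops growing; objective: alternative algorithm (no queue, no frontier).

-- ===== PORT A =====
-- inner body of A's while loop: "for v in cfg.get(u, []): if v not in dist: dist[v] = dist[u] + 1; q.append(v)".
-- (dist[u] is exact as getD u 0: u is always a key of dist when it is popped.)
def pvStepA (u : String) (st : PySem.Dict String Int × List String) (v : String) :
    PySem.Dict String Int × List String :=
  if st.1.contains v then st
  else (st.1.insert v (st.1.getD u 0 + 1), st.2 ++ [v])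

-- A's while loop; one fuel unit per popleft.  For the fuel the port passes the fuel is
-- proved never to run out (pvTermA below), so `none` is unreachable there.
def pvLoopA (cfg : List (String × List String)) :
    Nat → PySem.Dict String Int → List String → Option (PySem.Dict String Int)
  | _, dist, [] => some dist
  | 0, _, _ :: _ => none
  | n+1, dist, u :: q =>
      let st := ((PySem.Dict.mk cfg).getD u []).foldl (pvStepA u) (dist, [])
      pvLoopA cfg n st.1 (q ++ st.2)

def get_path_lengths (cfg : List (String × List String)) (entry : String) : List (String × Int) :=
  let dist : PySem.Dict String Int := PySem.Dict.ofList [(entry, 0)]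
  ((pvLoopA cfg ((cfg.map (fun p => p.2.length)).sum + 1) dist [entry]).getD dist).items

-- ===== PORT B =====
-- inner body of B: "if v not in dist: dist[v] = du + 1"
def pvRelaxB (dn : Int) (d : PySem.Dict String Int) (v : String) : PySem.Dict String Int :=
  if d.contains v then d else d.insert v dn

-- one snapshot entry (u, du) of B's round: "for v in cfg.get(u, []): …"
def pvRoundB (cfg : List (String × List String)) (d : PySem.Dict String Int)
    (p : String × Int) : PySem.Dict String Int :=
  ((PySem.Dict.mk cfg).getD p.1 []).foldl (pvRelaxB (p.2 + 1)) d

-- B's "while True" loop; one fuel unit per round.  For the fuel the port passes the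
-- fuel is proved never to run out (pvTermB below), so `none` is unreachable there.
def pvLoopB (cfg : List (String × List String)) :
    Nat → PySem.Dict String Int → Option (PySem.Dict String Int)
  | 0, _ => none
  | n+1, dist =>
      let d' := dist.items.foldl (pvRoundB cfg) dist
      if d'.size = dist.size then some d' else pvLoopB cfg n d'

def get_path_lengths_alt (cfg : List (String × List String)) (entry : String) : List (String × Int) :=
  let dist : PySem.Dict String Int := PySem.Dict.ofList [(entry, 0)]
  ((pvLoopB cfg ((cfg.map (fun p => p.2.length)).sum + 2) dist).getD dist).items

-- ===== PRECONDITION & SPEC =====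
def Spec_get_path_lengths (cfg : List (String × List String)) (entry : String) (out : List (String × Int)) : Prop := out = get_path_lengths_alt cfg entry
instance (cfg : List (String × List String)) (entry : String) (out : List (String × Int)) : Decidable (Spec_get_path_lengths cfg entry out) := by unfold Spec_get_path_lengths; infer_instance

-- ===== CLAIM (what is proved, stated in full; the proofs are below) =====
def Claim_equal_get_path_lengths : Prop := ∀ (cfg : List (String × List String)) (entry : String), Dom_get_path_lengths cfg entry → Spec_get_path_lengths cfg entry (get_path_lengths cfg entry)

-- ===== LEMMAS AND PROOFS =====

-- generic form of the inner loop bodies (the inserted value may read the current dict)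
def pvGStep (val : PySem.Dict String Int → Int)
    (st : PySem.Dict String Int × List String) (v : String) :
    PySem.Dict String Int × List String :=
  if st.1.contains v then st
  else (st.1.insert v (val st.1), st.2 ++ [v])

-- proof-side frontier step (B's relaxation with its discovered nodes recorded)
def pvStepB (dnext : Int) (st : PySem.Dict String Int × List String) (v : String) :
    PySem.Dict String Int × List String :=
  if st.1.contains v then st
  else (st.1.insert v dnext, st.2 ++ [v])

-- proof-side: one frontier node processed at level dnext
def pvLevel (cfg : List (String × List String)) (dnext : Int)
    (st : PySem.Dict String Int × List String) (u : String) :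
    PySem.Dict String Int × List String :=
  ((PySem.Dict.mk cfg).getD u []).foldl (pvStepB dnext) st

-- every node the BFS can ever put into dist
def pvAll (cfg : List (String × List String)) (entry : String) : List String :=
  entry :: (cfg.map (fun p => p.2)).flatten

-- a nodup list is no longer than any list containing it
theorem pvLenLe (l l' : List String) (h : l.Nodup) (hs : l ⊆ l') : l.length ≤ l'.length := by
  calc l.length = l.toFinset.card := (List.toFinset_card_of_nodup h).symm
  _ ≤ l'.toFinset.card := Finset.card_le_card (fun x hx => by
      simpa [List.mem_toFinset] using hs (by simpa [List.mem_toFinset] using hx))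
  _ ≤ l'.length := l'.toFinset_card_le

-- successors looked up in cfg all lie in pvAll
theorem pvSuccSub (cfg : List (String × List String)) (u v : String)
    (h : v ∈ (PySem.Dict.mk cfg).getD u []) : v ∈ (cfg.map (fun p => p.2)).flatten := by
  induction cfg with
  | nil => simp [PySem.Dict.getD, PySem.Dict.get?] at h
  | cons p rest ih =>
    rw [PySem.Dict.getD_eq_get?_getD, PySem.Dict.get?_mk_cons] at h
    simp only [List.map_cons, List.flatten_cons, List.mem_append]
    by_cases hk : p.1 == u
    · simp only [hk, if_pos] at h
      exact Or.inl (by simpa using h)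
    · simp only [hk, if_neg, Bool.false_eq_true, not_false_iff] at h
      rw [← PySem.Dict.getD_eq_get?_getD] at h
      exact Or.inr (ih h)

-- the accumulator of the generic inner fold only ever grows at the back
theorem pvGAcc (val : PySem.Dict String Int → Int) (vs : List String)
    (dist : PySem.Dict String Int) (acc : List String) :
    vs.foldl (pvGStep val) (dist, acc)
      = ((vs.foldl (pvGStep val) (dist, [])).1,
         acc ++ (vs.foldl (pvGStep val) (dist, [])).2) := by
  induction vs generalizing dist acc with
  | nil => simp
  | cons v vs ih =>
    simp only [List.foldl_cons]
    by_cases hc : dist.contains v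
    · simpa [pvGStep, hc] using ih dist acc
    · simp only [pvGStep, hc, Bool.false_eq_true, ite_false, List.nil_append]
      rw [ih (dist.insert v (val dist)) (acc ++ [v]), ih (dist.insert v (val dist)) [v]]
      simp

-- the same, for a seed that is not a literal pair
theorem pvGAcc' (val : PySem.Dict String Int → Int) (vs : List String)
    (st : PySem.Dict String Int × List String) :
    vs.foldl (pvGStep val) st
      = ((vs.foldl (pvGStep val) (st.1, [])).1,
         st.2 ++ (vs.foldl (pvGStep val) (st.1, [])).2) := by
  have h := pvGAcc val vs st.1 st.2
  simpa using h

-- everything the generic inner fold guarantees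
theorem pvGSpec (val : PySem.Dict String Int → Int) (vs : List String)
    (dist : PySem.Dict String Int) :
    (∀ x, ((dist.get? x).isSome) →
        (vs.foldl (pvGStep val) (dist, [])).1.get? x = dist.get? x) ∧
    (vs.foldl (pvGStep val) (dist, [])).1.keys
        = dist.keys ++ (vs.foldl (pvGStep val) (dist, [])).2 ∧
    (dist.keys.Nodup → (vs.foldl (pvGStep val) (dist, [])).1.keys.Nodup) ∧
    (∀ w ∈ (vs.foldl (pvGStep val) (dist, [])).2,
        w ∈ vs ∧ ((vs.foldl (pvGStep val) (dist, [])).1.get? w).isSome) := by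
  induction vs generalizing dist with
  | nil => simp
  | cons v vs ih =>
    simp only [List.foldl_cons]
    by_cases hc : dist.contains v
    · simp only [pvGStep, hc, ite_true]
      obtain ⟨h1, h2, h3, h4⟩ := ih dist
      exact ⟨h1, h2, h3, fun w hw => ⟨List.mem_cons_of_mem _ (h4 w hw).1, (h4 w hw).2⟩⟩
    · simp only [pvGStep, hc, Bool.false_eq_true, ite_false, List.nil_append]
      have hnone : dist.get? v = none :=
        (PySem.Dict.get?_eq_none_iff_contains dist v).mpr (by simpa using hc)
      rw [pvGAcc val vs (dist.insert v (val dist)) [v]]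
      obtain ⟨h1, h2, h3, h4⟩ := ih (dist.insert v (val dist))
      refine ⟨?_, ?_, ?_, ?_⟩
      · intro x hx
        have hxv : x ≠ v := by
          intro he; rw [he, hnone] at hx; simp at hx
        have hpr : (dist.insert v (val dist)).get? x = dist.get? x :=
          PySem.Dict.get?_insert_of_ne dist (val dist) hxv
        rw [h1 x (by rw [hpr]; exact hx), hpr]
      · rw [h2, PySem.Dict.keys_insert_of_not_contains dist (val dist) (by simpa using hc)]
        simp
      · intro hn
        exact h3 (PySem.Dict.nodup_keys_insert dist v (val dist) hn)
      · intro w hw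
        rcases List.mem_append.mp hw with hw | hw
        · have hwv : w = v := by simpa using hw
          subst hwv
          have hsome : ((dist.insert w (val dist)).get? w).isSome := by
            rw [PySem.Dict.get?_insert_self]; rfl
          refine ⟨List.mem_cons_self, ?_⟩
          rw [h1 w hsome]; exact hsome
        · exact ⟨List.mem_cons_of_mem _ (h4 w hw).1, (h4 w hw).2⟩

-- the constant-value inner fold moreover records value dnext on every new node
theorem pvBVal (dnext : Int) (vs : List String) (dist : PySem.Dict String Int) :
    ∀ w ∈ (vs.foldl (pvGStep (fun _ => dnext)) (dist, [])).2,
      (vs.foldl (pvGStep (fun _ => dnext)) (dist, [])).1.get? w = some dnext := by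
  induction vs generalizing dist with
  | nil => simp
  | cons v vs ih =>
    simp only [List.foldl_cons]
    by_cases hc : dist.contains v
    · simpa [pvGStep, hc] using ih dist
    · simp only [pvGStep, hc, Bool.false_eq_true, ite_false, List.nil_append]
      rw [pvGAcc (fun _ => dnext) vs (dist.insert v dnext) [v]]
      intro w hw
      rcases List.mem_append.mp hw with hw | hw
      · have hwv : w = v := by simpa using hw
        subst hwv
        have hsome : ((dist.insert w dnext).get? w) = some dnext :=
          PySem.Dict.get?_insert_self dist w dnext
        rw [(pvGSpec (fun _ => dnext) vs (dist.insert w dnext)).1 w (by rw [hsome]; rfl), hsome]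
      · exact ih (dist.insert v dnext) w hw

-- the constant-value inner fold appends exactly its new nodes, paired with dnext, to items
theorem pvGItems (dnext : Int) (vs : List String) (dist : PySem.Dict String Int) :
    (vs.foldl (pvGStep (fun _ => dnext)) (dist, [])).1.items
      = dist.items
        ++ ((vs.foldl (pvGStep (fun _ => dnext)) (dist, [])).2).map (fun w => (w, dnext)) := by
  induction vs generalizing dist with
  | nil => simp
  | cons v vs ih =>
    simp only [List.foldl_cons]
    by_cases hc : dist.contains v
    · simpa [pvGStep, hc] using ih dist
    · simp only [pvGStep, hc, Bool.false_eq_true, ite_false, List.nil_append]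
      rw [pvGAcc (fun _ => dnext) vs (dist.insert v dnext) [v]]
      dsimp only
      rw [ih (dist.insert v dnext),
        PySem.Dict.items_insert_of_not_contains dist dnext (by simpa using hc)]
      simp

-- every scanned node is a key after the constant-value inner fold
theorem pvGIn (dnext : Int) (vs : List String) (dist : PySem.Dict String Int) :
    ∀ v ∈ vs, ((vs.foldl (pvGStep (fun _ => dnext)) (dist, [])).1.get? v).isSome := by
  induction vs generalizing dist with
  | nil => simp
  | cons v vs ih =>
    intro w hw
    simp only [List.foldl_cons]
    by_cases hc : dist.contains v
    · simp only [pvGStep, hc, ite_true]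
      rcases List.mem_cons.mp hw with hw | hw
      · subst hw
        have hsome : (dist.get? w).isSome := by
          rw [← PySem.Dict.contains_eq_isSome_get?]; exact hc
        rw [(pvGSpec (fun _ => dnext) vs dist).1 w hsome]; exact hsome
      · exact ih dist w hw
    · simp only [pvGStep, hc, Bool.false_eq_true, ite_false, List.nil_append]
      rw [pvGAcc (fun _ => dnext) vs (dist.insert v dnext) [v]]
      dsimp only
      rcases List.mem_cons.mp hw with hw | hw
      · subst hw
        have hsome : ((dist.insert w dnext).get? w).isSome := by
          rw [PySem.Dict.get?_insert_self]; rfl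
        rw [(pvGSpec (fun _ => dnext) vs (dist.insert w dnext)).1 w hsome]; exact hsome
      · exact ih (dist.insert v dnext) w hw

-- A's inner fold IS the constant-value fold once dist[u] is known
theorem pvAeqB (u : String) (lv : Int) (vs : List String)
    (st : PySem.Dict String Int × List String) (h : st.1.get? u = some lv) :
    vs.foldl (pvStepA u) st = vs.foldl (pvStepB (lv + 1)) st := by
  induction vs generalizing st with
  | nil => rfl
  | cons v vs ih =>
    simp only [List.foldl_cons]
    by_cases hc : st.1.contains v
    · simp only [pvStepA, pvStepB, hc, ite_true]
      exact ih st h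
    · have hnone : st.1.get? v = none :=
        (PySem.Dict.get?_eq_none_iff_contains st.1 v).mpr (by simpa using hc)
      have huv : u ≠ v := by
        intro he; rw [he, hnone] at h; simp at h
      have hval : st.1.getD u 0 = lv := PySem.Dict.getD_of_get?_eq_some st.1 0 h
      simp only [pvStepA, pvStepB, hc, Bool.false_eq_true, ite_false, hval]
      exact ih (st.1.insert v (lv + 1), st.2 ++ [v])
        (by rw [PySem.Dict.get?_insert_of_ne st.1 (lv + 1) huv]; exact h)

-- pvStepB is pvGStep with a constant value
theorem pvStepB_eq (dnext : Int) : pvStepB dnext = pvGStep (fun _ => dnext) := rfl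

-- level-fold accumulator lemma
theorem pvLvlAcc (cfg : List (String × List String)) (dnext : Int) (f : List String)
    (st : PySem.Dict String Int × List String) :
    f.foldl (pvLevel cfg dnext) st
      = ((f.foldl (pvLevel cfg dnext) (st.1, [])).1,
         st.2 ++ (f.foldl (pvLevel cfg dnext) (st.1, [])).2) := by
  induction f generalizing st with
  | nil => simp
  | cons u f ih =>
    simp only [List.foldl_cons, pvLevel, pvStepB_eq]
    rw [pvGAcc' (fun _ => dnext) ((PySem.Dict.mk cfg).getD u []) st]
    rw [ih ((((PySem.Dict.mk cfg).getD u []).foldl (pvGStep (fun _ => dnext)) (st.1, [])).1,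
          st.2 ++ (((PySem.Dict.mk cfg).getD u []).foldl (pvGStep (fun _ => dnext)) (st.1, [])).2)]
    rw [ih (((PySem.Dict.mk cfg).getD u []).foldl (pvGStep (fun _ => dnext)) (st.1, []))]
    dsimp only
    simp [List.append_assoc]

-- everything a whole level fold guarantees
theorem pvLvlSpec (cfg : List (String × List String)) (dnext : Int) (f : List String)
    (dist : PySem.Dict String Int) :
    (∀ x, ((dist.get? x).isSome) →
        (f.foldl (pvLevel cfg dnext) (dist, [])).1.get? x = dist.get? x) ∧
    (f.foldl (pvLevel cfg dnext) (dist, [])).1.keys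
        = dist.keys ++ (f.foldl (pvLevel cfg dnext) (dist, [])).2 ∧
    (dist.keys.Nodup → (f.foldl (pvLevel cfg dnext) (dist, [])).1.keys.Nodup) ∧
    (∀ w ∈ (f.foldl (pvLevel cfg dnext) (dist, [])).2,
        w ∈ (cfg.map (fun p => p.2)).flatten ∧
        (f.foldl (pvLevel cfg dnext) (dist, [])).1.get? w = some dnext) := by
  induction f generalizing dist with
  | nil => simp
  | cons u f ih =>
    simp only [List.foldl_cons, pvLevel, pvStepB_eq]
    obtain ⟨e1, e2, e3, e4⟩ := pvGSpec (fun _ => dnext) ((PySem.Dict.mk cfg).getD u []) dist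
    have e5 := pvBVal dnext ((PySem.Dict.mk cfg).getD u []) dist
    obtain ⟨l1, l2, l3, l4⟩ :=
      ih (((PySem.Dict.mk cfg).getD u []).foldl (pvGStep (fun _ => dnext)) (dist, [])).1
    rw [pvLvlAcc cfg dnext f
      (((PySem.Dict.mk cfg).getD u []).foldl (pvGStep (fun _ => dnext)) (dist, []))]
    dsimp only
    refine ⟨?_, ?_, ?_, ?_⟩
    · intro x hx
      rw [l1 x (by rw [e1 x hx]; exact hx), e1 x hx]
    · rw [l2, e2]
      simp [List.append_assoc]
    · intro hn; exact l3 (e3 hn)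
    · intro w hw
      rcases List.mem_append.mp hw with hw | hw
      · refine ⟨pvSuccSub cfg u w (e4 w hw).1, ?_⟩
        rw [l1 w (by rw [e5 w hw]; rfl), e5 w hw]
      · exact l4 w hw

-- a whole level fold appends exactly its new nodes, paired with dnext, to items
theorem pvLvlItems (cfg : List (String × List String)) (dnext : Int) (f : List String)
    (dist : PySem.Dict String Int) :
    (f.foldl (pvLevel cfg dnext) (dist, [])).1.items
      = dist.items
        ++ ((f.foldl (pvLevel cfg dnext) (dist, [])).2).map (fun w => (w, dnext)) := by
  induction f generalizing dist with
  | nil => simp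
  | cons u f ih =>
    simp only [List.foldl_cons, pvLevel, pvStepB_eq]
    rw [pvLvlAcc cfg dnext f
      (((PySem.Dict.mk cfg).getD u []).foldl (pvGStep (fun _ => dnext)) (dist, []))]
    dsimp only
    rw [ih (((PySem.Dict.mk cfg).getD u []).foldl (pvGStep (fun _ => dnext)) (dist, [])).1,
      pvGItems dnext ((PySem.Dict.mk cfg).getD u []) dist]
    simp

-- after a level fold every successor of every processed frontier node is a key
theorem pvLvlSucc (cfg : List (String × List String)) (dnext : Int) (f : List String)
    (dist : PySem.Dict String Int) :
    ∀ u ∈ f, ∀ v ∈ (PySem.Dict.mk cfg).getD u [],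
      ((f.foldl (pvLevel cfg dnext) (dist, [])).1.get? v).isSome := by
  induction f generalizing dist with
  | nil => simp
  | cons u f ih =>
    intro w hw v hv
    simp only [List.foldl_cons, pvLevel, pvStepB_eq]
    rw [pvLvlAcc cfg dnext f
      (((PySem.Dict.mk cfg).getD u []).foldl (pvGStep (fun _ => dnext)) (dist, []))]
    dsimp only
    rcases List.mem_cons.mp hw with hw | hw
    · subst hw
      have hsome := pvGIn dnext ((PySem.Dict.mk cfg).getD w []) dist v hv
      rw [(pvLvlSpec cfg dnext f
        (((PySem.Dict.mk cfg).getD w []).foldl (pvGStep (fun _ => dnext)) (dist, [])).1).1 v hsome]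
      exact hsome
    · exact ih (((PySem.Dict.mk cfg).getD u []).foldl (pvGStep (fun _ => dnext)) (dist, [])).1
        w hw v hv

-- B's inner fold without the recorded-nodes component is the same dict
theorem pvDrop (dn : Int) (vs : List String) (d : PySem.Dict String Int) (acc : List String) :
    vs.foldl (pvRelaxB dn) d = (vs.foldl (pvGStep (fun _ => dn)) (d, acc)).1 := by
  induction vs generalizing d acc with
  | nil => rfl
  | cons v vs ih =>
    simp only [List.foldl_cons]
    by_cases hc : d.contains v
    · simp only [pvRelaxB, pvGStep, hc, ite_true]
      exact ih d acc
    · simp only [pvRelaxB, pvGStep, hc, Bool.false_eq_true, ite_false]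
      exact ih (d.insert v dn) (acc ++ [v])

-- relaxing successors that are all already keys changes nothing
theorem pvNoop (dn : Int) (vs : List String) (d : PySem.Dict String Int)
    (h : ∀ v ∈ vs, d.contains v) : vs.foldl (pvRelaxB dn) d = d := by
  induction vs with
  | nil => rfl
  | cons v vs ih =>
    simp only [List.foldl_cons, pvRelaxB, h v List.mem_cons_self, ite_true]
    exact ih (fun v hv => h v (List.mem_cons_of_mem _ hv))

-- a round over already-processed snapshot entries changes nothing
theorem pvNoopP (cfg : List (String × List String)) (P : List (String × Int))
    (d : PySem.Dict String Int)
    (h : ∀ p ∈ P, ∀ v ∈ (PySem.Dict.mk cfg).getD p.1 [], d.contains v) :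
    P.foldl (pvRoundB cfg) d = d := by
  induction P with
  | nil => rfl
  | cons p P ih =>
    simp only [List.foldl_cons, pvRoundB]
    rw [pvNoop (p.2 + 1) _ d (h p List.mem_cons_self)]
    exact ih (fun q hq => h q (List.mem_cons_of_mem _ hq))

-- a round over snapshot entries that all carry value lv is the level fold at lv+1
theorem pvMapFold (cfg : List (String × List String)) (lv : Int) (F : List String)
    (d : PySem.Dict String Int) (acc : List String) :
    (F.map (fun u => (u, lv))).foldl (pvRoundB cfg) d
      = (F.foldl (pvLevel cfg (lv + 1)) (d, acc)).1 := by
  induction F generalizing d acc with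
  | nil => rfl
  | cons u F ih =>
    simp only [List.map_cons, List.foldl_cons, pvRoundB, pvLevel, pvStepB_eq]
    rw [pvDrop (lv + 1) ((PySem.Dict.mk cfg).getD u []) d acc]
    exact ih _ _

-- B's whole round, under the snapshot invariant, is A's level fold
theorem pvRoundSplit (cfg : List (String × List String)) (lv : Int)
    (P : List (String × Int)) (F : List String) (d : PySem.Dict String Int)
    (h : ∀ p ∈ P, ∀ v ∈ (PySem.Dict.mk cfg).getD p.1 [], d.contains v) :
    (P ++ F.map (fun u => (u, lv))).foldl (pvRoundB cfg) d
      = (F.foldl (pvLevel cfg (lv + 1)) (d, [])).1 := by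
  rw [List.foldl_append, pvNoopP cfg P d h]
  exact pvMapFold cfg lv F d []

-- A's queue loop, run across one whole layer f (g = nodes already discovered behind it)
theorem pvBatch (cfg : List (String × List String)) (lv : Int) (f : List String) :
    ∀ (n : Nat) (dist : PySem.Dict String Int) (g : List String),
    (∀ u ∈ f, dist.get? u = some lv) →
    pvLoopA cfg n dist (f ++ g)
      = if f.length ≤ n then
          pvLoopA cfg (n - f.length)
            (f.foldl (pvLevel cfg (lv+1)) (dist, g)).1
            (f.foldl (pvLevel cfg (lv+1)) (dist, g)).2
        else none := by
  induction f with
  | nil => intro n dist g h; simp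
  | cons u f ih =>
    intro n dist g h
    match n with
    | 0 => simp [pvLoopA]
    | Nat.succ n =>
      have hne : (((PySem.Dict.mk cfg).getD u []).foldl (pvStepA u) (dist, ([] : List String)))
          = ((PySem.Dict.mk cfg).getD u []).foldl (pvStepB (lv + 1)) (dist, []) :=
        pvAeqB u lv _ (dist, []) (h u List.mem_cons_self)
      simp only [List.cons_append, pvLoopA, hne]
      simp only [List.foldl_cons, pvLevel, pvStepB_eq]
      rw [pvGAcc (fun _ => (lv+1)) ((PySem.Dict.mk cfg).getD u []) dist g]
      have hinv : ∀ u' ∈ f,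
          (((PySem.Dict.mk cfg).getD u []).foldl (pvGStep (fun _ => (lv+1))) (dist, [])).1.get? u'
            = some lv := by
        intro u' hu'
        have hp := (pvGSpec (fun _ => (lv+1)) ((PySem.Dict.mk cfg).getD u []) dist).1 u'
          (by rw [h u' (List.mem_cons_of_mem _ hu')]; rfl)
        rw [hp, h u' (List.mem_cons_of_mem _ hu')]
      have hq : (f ++ g) ++ (((PySem.Dict.mk cfg).getD u []).foldl
            (pvGStep (fun _ => (lv+1))) (dist, [])).2
          = f ++ (g ++ (((PySem.Dict.mk cfg).getD u []).foldl
            (pvGStep (fun _ => (lv+1))) (dist, [])).2) := List.append_assoc _ _ _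
      rw [hq]
      rw [ih n (((PySem.Dict.mk cfg).getD u []).foldl (pvGStep (fun _ => (lv+1))) (dist, [])).1
        (g ++ (((PySem.Dict.mk cfg).getD u []).foldl (pvGStep (fun _ => (lv+1))) (dist, [])).2)
        hinv]
      by_cases hle : f.length ≤ n
      · rw [if_pos hle, if_pos (by simp only [List.length_cons]; omega)]
        have hsub : n + 1 - (u :: f).length = n - f.length := by
          simp only [List.length_cons]; omega
        rw [hsub]
      · rw [if_neg hle, if_neg (by simp only [List.length_cons]; omega)]

-- whenever both loops complete, they compute the same dict
theorem pvABEq (cfg : List (String × List String)) :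
    ∀ (m : Nat) (P : List (String × Int)) (F : List String)
      (dist : PySem.Dict String Int) (lv : Int)
      (n : Nat) (rA rB : PySem.Dict String Int),
    dist.items = P ++ F.map (fun u => (u, lv)) →
    (∀ p ∈ P, ∀ v ∈ (PySem.Dict.mk cfg).getD p.1 [], (dist.get? v).isSome) →
    (∀ u ∈ F, dist.get? u = some lv) →
    pvLoopA cfg n dist F = some rA → pvLoopB cfg m dist = some rB → rA = rB := by
  intro m
  induction m with
  | zero => intro P F dist lv n rA rB _ _ _ _ hB; simp [pvLoopB] at hB
  | succ m ih =>
    intro P F dist lv n rA rB hitems hP hF hA hB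
    have hcontains : ∀ p ∈ P, ∀ v ∈ (PySem.Dict.mk cfg).getD p.1 [], dist.contains v := by
      intro p hp v hv
      rw [PySem.Dict.contains_eq_isSome_get?]
      exact hP p hp v hv
    have hround : dist.items.foldl (pvRoundB cfg) dist
        = (F.foldl (pvLevel cfg (lv + 1)) (dist, [])).1 := by
      rw [hitems]; exact pvRoundSplit cfg lv P F dist hcontains
    obtain ⟨l1, l2, l3, l4⟩ := pvLvlSpec cfg (lv + 1) F dist
    have hitems' := pvLvlItems cfg (lv + 1) F dist
    set D := (F.foldl (pvLevel cfg (lv + 1)) (dist, [])).1 with hD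
    rw [← List.append_nil F] at hA
    rw [pvBatch cfg lv F n dist [] hF] at hA
    split at hA
    case isFalse => exact absurd hA (by simp)
    case isTrue hle =>
      simp only [pvLoopB, hround] at hB
      cases hae : (F.foldl (pvLevel cfg (lv + 1)) (dist, [])).2 with
      | nil =>
        have hsize : D.size = dist.size := by
          show D.items.length = dist.items.length
          rw [hitems', hae]; simp
        rw [if_pos hsize] at hB
        rw [hae] at hA
        have hAval : some D = some rA := by
          cases hfuel : n - F.length <;> simpa [pvLoopA] using hA
        rw [← Option.some_injective _ hAval]
        exact Option.some_injective _ hB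
      | cons w ws =>
        have hsize : D.size = dist.size + (w :: ws).length := by
          show D.items.length = dist.items.length + (w :: ws).length
          rw [hitems', hae]; simp
        have hne : ¬ (D.size = dist.size) := by
          rw [hsize]; simp
        rw [if_neg hne] at hB
        rw [hae] at hA hitems'
        refine ih dist.items (w :: ws) D (lv + 1) (n - F.length) rA rB hitems' ?_ ?_ hA hB
        · intro p hp v hv
          rw [hitems] at hp
          rcases List.mem_append.mp hp with hp | hp
          · have hsome := hP p hp v hv
            rw [l1 v hsome]; exact hsome
          · obtain ⟨u, hu, huq⟩ := List.mem_map.mp hp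
            have hpu : p.1 = u := by rw [← huq]
            rw [hpu] at hv
            exact pvLvlSucc cfg (lv + 1) F dist u hu v hv
        · intro u hu
          rw [← hae] at hu
          exact (l4 u hu).2

-- A's loop completes within the fuel the port passes
theorem pvTermA (cfg : List (String × List String)) (entry : String) :
    ∀ (n : Nat) (dist : PySem.Dict String Int) (q : List String),
    dist.keys.Nodup → (∀ k ∈ dist.keys, k ∈ pvAll cfg entry) →
    (∀ u ∈ q, (dist.get? u).isSome) →
    q.length + (pvAll cfg entry).length ≤ n + dist.keys.length →
    (pvLoopA cfg n dist q).isSome := by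
  intro n
  induction n with
  | zero =>
    intro dist q hnd hsub hq harith
    match q with
    | [] => simp [pvLoopA]
    | u :: q =>
      have := pvLenLe dist.keys (pvAll cfg entry) hnd hsub
      simp only [List.length_cons] at harith
      omega
  | succ n ih =>
    intro dist q hnd hsub hq harith
    match q with
    | [] => simp [pvLoopA]
    | u :: q =>
      simp only [pvLoopA]
      have hstep : ((PySem.Dict.mk cfg).getD u []).foldl (pvStepA u) (dist, ([] : List String))
          = ((PySem.Dict.mk cfg).getD u []).foldl (pvGStep (fun d => d.getD u 0 + 1)) (dist, []) := rfl
      rw [hstep]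
      obtain ⟨e1, e2, e3, e4⟩ := pvGSpec (fun d => d.getD u 0 + 1) ((PySem.Dict.mk cfg).getD u []) dist
      set E := ((PySem.Dict.mk cfg).getD u []).foldl (pvGStep (fun d => d.getD u 0 + 1)) (dist, ([] : List String))
      apply ih E.1 (q ++ E.2)
      · exact e3 hnd
      · intro k hk
        rw [e2] at hk
        rcases List.mem_append.mp hk with hk | hk
        · exact hsub k hk
        · exact List.mem_cons_of_mem _ (pvSuccSub cfg u k (e4 k hk).1)
      · intro w hw
        rcases List.mem_append.mp hw with hw | hw
        · rw [e1 w (hq w (List.mem_cons_of_mem _ hw))]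
          exact hq w (List.mem_cons_of_mem _ hw)
        · exact (e4 w hw).2
      · have hkeys : E.1.keys.length = dist.keys.length + E.2.length := by
          rw [e2, List.length_append]
        simp only [List.length_append, List.length_cons] at harith ⊢
        omega

-- a round over ANY snapshot list only appends keys drawn from cfg's successor lists
theorem pvRoundKeys (cfg : List (String × List String)) :
    ∀ (ps : List (String × Int)) (d : PySem.Dict String Int),
    ∃ L : List String,
      (ps.foldl (pvRoundB cfg) d).keys = d.keys ++ L ∧
      (∀ x ∈ L, x ∈ (cfg.map (fun p => p.2)).flatten) ∧
      (d.keys.Nodup → (ps.foldl (pvRoundB cfg) d).keys.Nodup) := by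
  intro ps
  induction ps with
  | nil => intro d; exact ⟨[], by simp, by simp, fun h => h⟩
  | cons p ps ih =>
    intro d
    simp only [List.foldl_cons, pvRoundB]
    rw [pvDrop (p.2 + 1) ((PySem.Dict.mk cfg).getD p.1 []) d []]
    obtain ⟨e1, e2, e3, e4⟩ := pvGSpec (fun _ => p.2 + 1) ((PySem.Dict.mk cfg).getD p.1 []) d
    set E := ((PySem.Dict.mk cfg).getD p.1 []).foldl (pvGStep (fun _ => p.2 + 1)) (d, ([] : List String))
    obtain ⟨L, hL1, hL2, hL3⟩ := ih E.1
    refine ⟨E.2 ++ L, ?_, ?_, ?_⟩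
    · rw [hL1, e2, List.append_assoc]
    · intro x hx
      rcases List.mem_append.mp hx with hx | hx
      · exact pvSuccSub cfg p.1 x (e4 x hx).1
      · exact hL2 x hx
    · intro hn; exact hL3 (e3 hn)

-- B's loop completes within the fuel the port passes
theorem pvTermB (cfg : List (String × List String)) (entry : String) :
    ∀ (n : Nat) (dist : PySem.Dict String Int),
    dist.keys.Nodup → (∀ k ∈ dist.keys, k ∈ pvAll cfg entry) →
    (pvAll cfg entry).length + 1 ≤ n + dist.keys.length →
    (pvLoopB cfg n dist).isSome := by
  intro n
  induction n with
  | zero =>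
    intro dist hnd hsub harith
    have := pvLenLe dist.keys (pvAll cfg entry) hnd hsub
    omega
  | succ n ih =>
    intro dist hnd hsub harith
    simp only [pvLoopB]
    obtain ⟨L, hL1, hL2, hL3⟩ := pvRoundKeys cfg dist.items dist
    set D := dist.items.foldl (pvRoundB cfg) dist
    by_cases hsz : D.size = dist.size
    · simp [hsz]
    · simp only [hsz, ite_false]
      have hklen : D.keys.length = dist.keys.length + L.length := by
        rw [hL1, List.length_append]
      have hszk : D.size = D.keys.length := (List.length_map _).symm
      have hszk' : dist.size = dist.keys.length := (List.length_map _).symm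
      have hLlen : 1 ≤ L.length := by
        cases hLe : L with
        | nil =>
          rw [hLe] at hklen
          simp only [List.length_nil, Nat.add_zero] at hklen
          exact absurd (by rw [hszk, hszk', hklen]) hsz
        | cons a l => simp
      apply ih D (hL3 hnd)
      · intro k hk
        rw [hL1] at hk
        rcases List.mem_append.mp hk with hk | hk
        · exact hsub k hk
        · exact List.mem_cons_of_mem _ (hL2 k hk)
      · omega

-- ===== VERDICT (by name: the statement is the Claim_ definition above) =====
theorem get_path_lengths_spec : Claim_equal_get_path_lengths := by
  intro cfg entry _
  unfold Spec_get_path_lengths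
  simp only [get_path_lengths, get_path_lengths_alt]
  have hkeys : (PySem.Dict.ofList [(entry, (0 : Int))]).keys = [entry] := rfl
  have hget : (PySem.Dict.ofList [(entry, (0 : Int))]).get? entry = some 0 := by
    rw [show PySem.Dict.ofList [(entry, (0 : Int))]
        = PySem.Dict.mk [(entry, (0 : Int))] from rfl, PySem.Dict.get?_mk_cons]
    simp
  have hAll : (pvAll cfg entry).length = (cfg.map (fun p => p.2.length)).sum + 1 := by
    simp [pvAll, List.length_flatten, List.map_map, Function.comp_def]
  have hA : (pvLoopA cfg ((cfg.map (fun p => p.2.length)).sum + 1)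
      (PySem.Dict.ofList [(entry, 0)]) [entry]).isSome := by
    apply pvTermA cfg entry _ _ [entry]
    · rw [hkeys]; simp
    · intro k hk
      rw [hkeys] at hk
      simp only [List.mem_singleton] at hk
      rw [hk]; exact List.mem_cons_self
    · intro u hu
      simp only [List.mem_singleton] at hu
      rw [hu, hget]; rfl
    · rw [hAll, hkeys]
      simp only [List.length_cons]
      omega
  have hB : (pvLoopB cfg ((cfg.map (fun p => p.2.length)).sum + 2)
      (PySem.Dict.ofList [(entry, 0)])).isSome := by
    apply pvTermB cfg entry
    · rw [hkeys]; simp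
    · intro k hk
      rw [hkeys] at hk
      simp only [List.mem_singleton] at hk
      rw [hk]; exact List.mem_cons_self
    · rw [hAll, hkeys]
      simp only [List.length_cons]
      omega
  obtain ⟨rA, hrA⟩ := Option.isSome_iff_exists.mp hA
  obtain ⟨rB, hrB⟩ := Option.isSome_iff_exists.mp hB
  have hitems : (PySem.Dict.ofList [(entry, (0 : Int))]).items
      = [] ++ [entry].map (fun u => (u, (0 : Int))) := rfl
  have hinv : ∀ u ∈ [entry], (PySem.Dict.ofList [(entry, (0 : Int))]).get? u = some 0 := by
    intro u hu
    simp only [List.mem_singleton] at hu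
    rw [hu, hget]
  have heq := pvABEq cfg ((cfg.map (fun p => p.2.length)).sum + 2) [] [entry]
    (PySem.Dict.ofList [(entry, 0)]) 0 ((cfg.map (fun p => p.2.length)).sum + 1)
    rA rB hitems (by simp) hinv hrA hrB
  rw [hrA, hrB]
  simp [heq]
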